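-- pv_equiv track=rewrite | github.com/yredwood/algorithm_practices | protection/_old.py | _step
-- ===== SOURCE A (Python) =====
-- import itertools
--
-- class Protection():
--     def __init__(self, prt_list, K):
--
--         self.D = len(prt_list)
--         self.W = len(prt_list[0])
--         self.K = K
--         self.p = prt_list
--         #assert len(self.p) == D
--
--         self.p_T = []
--         self.cnt = 0
--         for w in range(self.W):
--             ver = ''.join([p[w] for p in prt_list])
--             if '0'*self.K in ver or '1'*self.K in ver:
--                 self.cnt+=1
--             self.p_T.append(
--                 ver
--             )
--         #assert len(self.p_T) == W
--         # a: 0, b: 1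
--
--     def count_pass(self):
--         return self.cnt
--
-- def _step(prt_list, K, n_step):
--     D = len(prt_list)
--     W = len(prt_list[0])
--
--     a_list = [i+1 for i in range(D)]
--     b_list = [-i-1 for i in range(D)]
--     pairs = itertools.combinations(a_list + b_list, n_step)
--
--     for i, tup in enumerate(pairs):
--         #print (tup, sorted_scores[i])
--
--         positive_tups = []
--         flag = 0
--         for t in tup:
--             if t > 0:
--                 _t = t-1
--             else:
--                 _t = -t-1
--             if _t in positive_tups:
--                 flag = 1
--
--             positive_tups.append(_t)
--         if flag:
--             continue
--
--         new_prt = prt_list.copy()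
--         for t in tup:
--             if t > 0:
--                 new_prt[t-1] = '0'*W
--             else:
--                 new_prt[-t-1] = '1'*W
--
--         p = Protection(new_prt, K)
--         score = p.count_pass()
--         if score == W:
--             return True
--
--     return False
-- ===== SOURCE B (Python) =====
-- import itertools
--
-- def _step(prt_list, K, n_step):
--     W = len(prt_list[0])
--     zeros, ones = '0' * K, '1' * K
--     for rows in itertools.combinations(range(len(prt_list)), n_step):
--         for signs in itertools.product('01', repeat=n_step):
--             new_prt = list(prt_list)
--             for r, ch in zip(rows, signs):
--                 new_prt[r] = ch * W
--             if all(zeros in col or ones in col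
--                    for col in (''.join(row[w] for row in new_prt) for w in range(W))):
--                 return True
--     return False
-- ===== Notes on version B (the rewrite author's own statement) =====
-- stated objective: alternative
-- what changed: B enumerates only valid configurations directly (combinations of distinct row indices times a product of '0'/'1' signs with an early-exit all() column check) instead of A's combinations over signed labels a_list+b_list followed by a reuse-detection scan that discards invalid tuples and a full column count compared against W.
-- outside the precondition, e.g. on _step(['ab', 'a', 'cd'], 1, 2): A returns True, B returns True
import Mathlib
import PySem

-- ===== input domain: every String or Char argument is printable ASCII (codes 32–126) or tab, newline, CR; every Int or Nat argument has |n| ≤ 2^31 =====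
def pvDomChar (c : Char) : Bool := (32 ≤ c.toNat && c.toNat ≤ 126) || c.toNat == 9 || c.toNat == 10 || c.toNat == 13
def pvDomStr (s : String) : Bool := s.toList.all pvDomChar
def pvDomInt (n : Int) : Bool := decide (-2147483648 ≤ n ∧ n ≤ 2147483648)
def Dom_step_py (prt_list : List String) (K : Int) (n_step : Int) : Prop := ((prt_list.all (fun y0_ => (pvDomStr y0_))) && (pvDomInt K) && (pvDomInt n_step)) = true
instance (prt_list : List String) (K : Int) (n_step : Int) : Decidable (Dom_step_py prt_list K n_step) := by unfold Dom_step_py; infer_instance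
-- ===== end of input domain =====

-- B replaces A's combinations over signed row labels (with an inner reuse-detection scan and
-- a full column count compared to W) by a constructive enumeration: distinct rows via
-- combinations(range(D), n_step), signs via product('01', ...), and an early-exit all() check.
-- Objective: alternative (same exhaustive search space, generated without invalid candidates).

-- ===== PORT A =====
-- Protection(new_prt, K).count_pass(): cnt of columns containing a run '0'*K or '1'*K.
-- ''.join([p[w] for p in prt]) is the list of the w-th chars; p[w] is pyGet? (in range under Pre_).
def pvProtectionCnt (prt : List (List Char)) (K : Int) : Int :=
  let W := (prt.headD []).length
  (PySem.List.pyRange 0 W 1).foldl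
    (fun cnt w =>
      let ver := prt.map (fun p => (PySem.List.pyGet? p w).getD ' ')
      if PySem.Chars.isIn (PySem.List.pyRepeat ['0'] K) ver
          || PySem.Chars.isIn (PySem.List.pyRepeat ['1'] K) ver
      then cnt + 1 else cnt) 0

-- the 'for i, tup in enumerate(pairs)' loop with its two early returns
def pvStepLoop (prt : List (List Char)) (K : Int) (W : Nat) : List (List Int) → Bool
  | [] => false
  | tup :: rest =>
    -- positive_tups / flag scan
    let st := tup.foldl
      (fun (s : List Int × Int) t =>
        let _t := if t > 0 then t - 1 else -t - 1
        (s.1 ++ [_t], if _t ∈ s.1 then 1 else s.2)) ([], 0)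
    if st.2 ≠ 0 then pvStepLoop prt K W rest
    else
      let np := tup.foldl
        (fun np t =>
          if t > 0 then np.set (t - 1).toNat (List.replicate W '0')
          else np.set (-t - 1).toNat (List.replicate W '1')) prt
      if pvProtectionCnt np K = (W : Int) then true else pvStepLoop prt K W rest

def step_py (prt_list : List String) (K : Int) (n_step : Int) : Bool :=
  let prt := prt_list.map String.toList
  let D := prt.length
  let W := (prt.headD []).length
  let a_list := (PySem.List.pyRange 0 D 1).map (fun i => i + 1)
  let b_list := (PySem.List.pyRange 0 D 1).map (fun i => -i - 1)
  pvStepLoop prt K W (PySem.List.combinations (a_list ++ b_list) n_step.toNat)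

-- ===== PORT B =====
-- itertools.product('01', repeat=n), in product's order (first coordinate slowest)
def pvSignLists : Nat → List (List Char)
  | 0 => [[]]
  | n + 1 => ['0', '1'].flatMap (fun c => (pvSignLists n).map (fun l => c :: l))

-- all(zeros in col or ones in col for col in (… for w in range(W)))
def pvAllCols (np : List (List Char)) (K : Int) (W : Nat) : Bool :=
  (PySem.List.pyRange 0 W 1).all (fun w =>
    let col := np.map (fun row => (PySem.List.pyGet? row w).getD ' ')
    PySem.Chars.isIn (PySem.List.pyRepeat ['0'] K) col
      || PySem.Chars.isIn (PySem.List.pyRepeat ['1'] K) col)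

-- inner 'for signs in itertools.product(...)' loop
def pvInnerLoop (prt : List (List Char)) (K : Int) (W : Nat) (rows : List Nat) :
    List (List Char) → Bool
  | [] => false
  | signs :: rest =>
    let np := (rows.zip signs).foldl
      (fun np rc => np.set rc.1 (List.replicate W rc.2)) prt
    if pvAllCols np K W then true else pvInnerLoop prt K W rows rest

-- outer 'for rows in itertools.combinations(range(D), n_step)' loop
def pvOuterLoop (prt : List (List Char)) (K : Int) (W : Nat) (n : Nat) :
    List (List Nat) → Bool
  | [] => false
  | rows :: rest =>
    if pvInnerLoop prt K W rows (pvSignLists n) then true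
    else pvOuterLoop prt K W n rest

def step_py_alt (prt_list : List String) (K : Int) (n_step : Int) : Bool :=
  let prt := prt_list.map String.toList
  let W := (prt.headD []).length
  pvOuterLoop prt K W n_step.toNat
    (PySem.List.combinations (List.range prt.length) n_step.toNat)

-- ===== PRECONDITION & SPEC =====
-- Pre_ excludes the inputs where Python A raises: an empty prt_list (IndexError on prt_list[0]),
-- a negative n_step (ValueError in itertools.combinations), and lists with a row shorter than
-- row 0 while n_step < len(prt_list) (IndexError on p[w] in Protection; for n_step >= len(prt_list)
-- every candidate either replaces all rows or is discarded, so A returns without raising).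
-- The rare excluded inputs on which A still returns (its very first candidate already passes,
-- before any short row is read) are cited in claim.json; A and B agree there too.
def Pre_step_py (prt_list : List String) (K : Int) (n_step : Int) : Prop :=
  prt_list ≠ [] ∧ 0 ≤ n_step ∧
    ((∀ s ∈ prt_list, (prt_list.headD "").toList.length ≤ s.toList.length) ∨
      (prt_list.length : Int) ≤ n_step)
instance (prt_list : List String) (K : Int) (n_step : Int) : Decidable (Pre_step_py prt_list K n_step) := by unfold Pre_step_py; infer_instance

def pvWitness_step_py : List String × Int × Int := (["01", "10"], 1, 1)

def Spec_step_py (prt_list : List String) (K : Int) (n_step : Int) (out : Bool) : Prop := out = step_py_alt prt_list K n_step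
instance (prt_list : List String) (K : Int) (n_step : Int) (out : Bool) : Decidable (Spec_step_py prt_list K n_step out) := by unfold Spec_step_py; infer_instance

-- ===== CLAIM (what is proved, stated in full; the proofs are below) =====
def Claim_equal_step_py : Prop := ∀ (prt_list : List String) (K : Int) (n_step : Int), Dom_step_py prt_list K n_step → Pre_step_py prt_list K n_step → Spec_step_py prt_list K n_step (step_py prt_list K n_step)

-- ===== LEMMAS AND PROOFS =====

-- index of the row a signed label t addresses, as in A's inner scan
def pvIdxI (t : Int) : Int := if t > 0 then t - 1 else -t - 1

-- the canonical assignment a signed label denotes: (row, fill char)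
def pvToRC (t : Int) : Nat × Char := ((pvIdxI t).toNat, if t > 0 then '0' else '1')

-- applying a list of (row, fill) assignments
def pvApplyS (prt : List (List Char)) (W : Nat) (s : List (Nat × Char)) : List (List Char) :=
  s.foldl (fun np rc => np.set rc.1 (List.replicate W rc.2)) prt

theorem pvSignLists_mem {n : Nat} {l : List Char} :
    l ∈ pvSignLists n ↔ l.length = n ∧ ∀ c ∈ l, c = '0' ∨ c = '1' := by
  induction n generalizing l with
  | zero =>
    constructor
    · intro h; simp [pvSignLists] at h; simp [h]
    · rintro ⟨hlen, -⟩
      simp [pvSignLists, List.length_eq_zero_iff.mp hlen]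
  | succ n ih =>
    simp only [pvSignLists, List.mem_flatMap, List.mem_map]
    constructor
    · rintro ⟨c, hc, l', hl', rfl⟩
      obtain ⟨hlen, hall⟩ := ih.mp hl'
      refine ⟨by simp [hlen], ?_⟩
      intro d hd
      rcases List.mem_cons.mp hd with rfl | hd
      · simpa using hc
      · exact hall d hd
    · rintro ⟨hlen, hall⟩
      cases l with
      | nil => simp at hlen
      | cons c l' =>
        refine ⟨c, ?_, l', ih.mpr ⟨by simpa using hlen,
          fun d hd => hall d (List.mem_cons_of_mem _ hd)⟩, rfl⟩
        simpa using hall c List.mem_cons_self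

theorem pvFlagMono (tup : List Int) (acc : List Int) (f : Int) (hf : f ≠ 0) :
    (tup.foldl (fun (s : List Int × Int) t =>
      let _t := if t > 0 then t - 1 else -t - 1
      (s.1 ++ [_t], if _t ∈ s.1 then 1 else s.2)) (acc, f)).2 ≠ 0 := by
  induction tup generalizing acc f with
  | nil => simpa using hf
  | cons t rest ih =>
    simp only [List.foldl_cons]
    apply ih
    split <;> split <;> simp [hf]

theorem pvFlagSpec (tup : List Int) (acc : List Int) (hacc : acc.Nodup) :
    ((tup.foldl (fun (s : List Int × Int) t =>
      let _t := if t > 0 then t - 1 else -t - 1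
      (s.1 ++ [_t], if _t ∈ s.1 then 1 else s.2)) (acc, 0)).2 = 0 ↔
      (acc ++ tup.map pvIdxI).Nodup) := by
  induction tup generalizing acc with
  | nil => simpa using hacc
  | cons t rest ih =>
    simp only [List.foldl_cons, List.map_cons]
    by_cases hmem : (if t > 0 then t - 1 else -t - 1) ∈ acc
    · have h1 : (rest.foldl (fun (s : List Int × Int) t =>
        let _t := if t > 0 then t - 1 else -t - 1
        (s.1 ++ [_t], if _t ∈ s.1 then 1 else s.2))
          (acc ++ [if t > 0 then t - 1 else -t - 1], 1)).2 ≠ 0 :=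
        pvFlagMono _ _ _ one_ne_zero
      have h2 : ¬ (acc ++ pvIdxI t :: rest.map pvIdxI).Nodup := by
        intro hnd
        exact (List.disjoint_of_nodup_append hnd) hmem (by simp [pvIdxI])
      simp only [if_pos hmem]
      constructor
      · intro h; exact absurd h h1
      · intro h; exact absurd h h2
    · simp only [if_neg hmem]
      have hacc' : (acc ++ [if t > 0 then t - 1 else -t - 1]).Nodup := by
        rw [List.nodup_append]
        refine ⟨hacc, List.nodup_singleton _, ?_⟩
        intro a ha b hb
        rw [List.mem_singleton] at hb
        subst hb
        exact fun h => hmem (h ▸ ha)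
      rw [ih _ hacc']
      constructor
      · intro h; simpa [pvIdxI] using h
      · intro h; simpa [pvIdxI] using h

theorem pvApplyA_eq (prt : List (List Char)) (W : Nat) (tup : List Int) :
    tup.foldl (fun np t =>
        if t > 0 then np.set (t - 1).toNat (List.replicate W '0')
        else np.set (-t - 1).toNat (List.replicate W '1')) prt
      = pvApplyS prt W (tup.map pvToRC) := by
  rw [pvApplyS, List.foldl_map]
  congr 1
  funext np t
  by_cases ht : t > 0 <;> simp [pvToRC, pvIdxI, ht]

theorem pvApplyS_headLen (prt : List (List Char)) (W : Nat) (s : List (Nat × Char))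
    (h : (prt.headD []).length = W) : ((pvApplyS prt W s).headD []).length = W := by
  induction s generalizing prt with
  | nil => exact h
  | cons rc rest ih =>
    apply ih
    obtain ⟨r, c⟩ := rc
    show ((prt.set r (List.replicate W c)).headD []).length = W
    cases prt with
    | nil => simpa using h
    | cons p ps =>
      cases r with
      | zero => simp
      | succ k => simpa using h

theorem pvPyRange_eq (W : Nat) :
    PySem.List.pyRange 0 W 1 = (List.range W).map (fun k : Nat => (k : Int)) := by
  rw [PySem.List.pyRange_of_pos _ _ one_pos]
  rcases Nat.eq_zero_or_pos W with h | h
  · simp [h]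
  · rw [if_pos (by exact_mod_cast h)]
    simp

theorem pvApplyS_perm (prt : List (List Char)) (W : Nat) {s s' : List (Nat × Char)}
    (hp : s.Perm s') (hnd : (s.map Prod.fst).Nodup) :
    pvApplyS prt W s = pvApplyS prt W s' := by
  unfold pvApplyS
  refine hp.foldl_eq' ?_ prt
  intro x hx y hy z
  by_cases hxy : x.1 = y.1
  · have : x = y := List.inj_on_of_nodup_map hnd hx hy hxy
    subst this; rfl
  · exact List.set_comm _ _ hxy

theorem pvSublistRange (l : List Nat) (D : Nat)
    (hp : l.Pairwise (· < ·)) (hb : ∀ x ∈ l, x < D) : l.Sublist (List.range D) := by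
  have hnd : l.Nodup := hp.imp Nat.ne_of_lt
  have hfil : (List.range D).filter (fun x => decide (x ∈ l)) = l := by
    apply List.eq_of_perm_of_sorted (le := fun a b : Nat => a < b)
      (fun a b _ _ h1 h2 => absurd h1 (Nat.lt_asymm h2))
    · exact List.pairwise_lt_range.filter _
    · exact hp
    · apply List.perm_of_nodup_nodup_toFinset_eq
        (List.nodup_range.filter _) hnd
      ext x
      simp only [List.mem_toFinset, List.mem_filter, List.mem_range, decide_eq_true_eq]
      exact ⟨fun h => h.2, fun h => ⟨hb x h, h⟩⟩
  rw [← hfil]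
  exact List.filter_sublist

theorem pvCnt_eq_iff (np : List (List Char)) (K : Int) (W : Nat)
    (h : (np.headD []).length = W) :
    (pvProtectionCnt np K = (W : Int)) ↔ pvAllCols np K W = true := by
  have e1 : pvProtectionCnt np K
      = List.foldl (fun cnt w =>
          if (PySem.Chars.isIn (PySem.List.pyRepeat ['0'] K)
                (np.map (fun p => (PySem.List.pyGet? p w).getD ' '))
              || PySem.Chars.isIn (PySem.List.pyRepeat ['1'] K)
                (np.map (fun p => (PySem.List.pyGet? p w).getD ' ')))
          then cnt + 1 else cnt) 0
          (PySem.List.pyRange 0 (((np.headD []).length : Nat) : Int) 1) := rfl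
  have e2 : pvAllCols np K W
      = (PySem.List.pyRange 0 ((W : Nat) : Int) 1).all (fun w =>
          PySem.Chars.isIn (PySem.List.pyRepeat ['0'] K)
              (np.map (fun p => (PySem.List.pyGet? p w).getD ' '))
            || PySem.Chars.isIn (PySem.List.pyRepeat ['1'] K)
              (np.map (fun p => (PySem.List.pyGet? p w).getD ' '))) := rfl
  rw [e1, e2, h, PySem.List.foldl_if_add_one, zero_add]
  have hlen : (PySem.List.pyRange 0 (W : Int) 1).length = W := by
    rw [pvPyRange_eq]; simp
  constructor
  · intro hcnt
    rw [List.all_eq_true]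
    refine List.countP_eq_length.mp ?_
    rw [hlen]
    exact_mod_cast hcnt
  · intro hall
    rw [List.countP_eq_length.mpr (fun w hw => List.all_eq_true.mp hall w hw), hlen]

theorem pvStepLoop_iff (prt : List (List Char)) (K : Int) (W : Nat)
    (l : List (List Int)) :
    pvStepLoop prt K W l = true ↔
      ∃ tup ∈ l, (tup.map pvIdxI).Nodup ∧
        pvProtectionCnt (pvApplyS prt W (tup.map pvToRC)) K = (W : Int) := by
  induction l with
  | nil => simp [pvStepLoop]
  | cons tup rest ih =>
    rw [pvStepLoop]
    have hflag := pvFlagSpec tup [] List.nodup_nil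
    simp only [List.nil_append] at hflag
    rw [pvApplyA_eq]
    by_cases hnd : (tup.map pvIdxI).Nodup
    · rw [if_neg (by simp [hflag.mpr hnd])]
      by_cases hcnt : pvProtectionCnt (pvApplyS prt W (tup.map pvToRC)) K = (W : Int)
      · simp [hcnt, hnd]
      · rw [if_neg hcnt, ih]
        constructor
        · rintro ⟨t, ht, h1, h2⟩; exact ⟨t, List.mem_cons_of_mem _ ht, h1, h2⟩
        · rintro ⟨t, ht, h1, h2⟩
          rcases List.mem_cons.mp ht with rfl | ht
          · exact absurd h2 hcnt
          · exact ⟨t, ht, h1, h2⟩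
    · rw [if_pos (by intro h0; exact hnd (hflag.mp h0)), ih]
      constructor
      · rintro ⟨t, ht, h1, h2⟩; exact ⟨t, List.mem_cons_of_mem _ ht, h1, h2⟩
      · rintro ⟨t, ht, h1, h2⟩
        rcases List.mem_cons.mp ht with rfl | ht
        · exact absurd h1 hnd
        · exact ⟨t, ht, h1, h2⟩

theorem pvInnerLoop_iff (prt : List (List Char)) (K : Int) (W : Nat)
    (rows : List Nat) (l : List (List Char)) :
    pvInnerLoop prt K W rows l = true ↔
      ∃ signs ∈ l, pvAllCols (pvApplyS prt W (rows.zip signs)) K W = true := by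
  induction l with
  | nil => simp [pvInnerLoop]
  | cons signs rest ih =>
    rw [pvInnerLoop]
    by_cases hp : pvAllCols (pvApplyS prt W (rows.zip signs)) K W = true
    · simp only [pvApplyS] at hp ⊢
      simp [hp]
    · rw [if_neg (by simpa [pvApplyS] using hp), ih]
      constructor
      · rintro ⟨sg, hsg, h⟩; exact ⟨sg, List.mem_cons_of_mem _ hsg, h⟩
      · rintro ⟨sg, hsg, h⟩
        rcases List.mem_cons.mp hsg with rfl | hsg
        · exact absurd h hp
        · exact ⟨sg, hsg, h⟩

theorem pvOuterLoop_iff (prt : List (List Char)) (K : Int) (W : Nat) (n : Nat)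
    (l : List (List Nat)) :
    pvOuterLoop prt K W n l = true ↔
      ∃ rows ∈ l, pvInnerLoop prt K W rows (pvSignLists n) = true := by
  induction l with
  | nil => simp [pvOuterLoop]
  | cons rows rest ih =>
    rw [pvOuterLoop]
    by_cases hp : pvInnerLoop prt K W rows (pvSignLists n) = true
    · simp [hp]
    · rw [if_neg hp, ih]
      constructor
      · rintro ⟨r, hr, h⟩; exact ⟨r, List.mem_cons_of_mem _ hr, h⟩
      · rintro ⟨r, hr, h⟩
        rcases List.mem_cons.mp hr with rfl | hr
        · exact absurd h hp
        · exact ⟨r, hr, h⟩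

theorem pvMain (prt : List (List Char)) (K : Int) (n : Nat) :
    pvStepLoop prt K (prt.headD []).length
      (PySem.List.combinations
        (((PySem.List.pyRange 0 prt.length 1).map (fun i => i + 1)) ++
          ((PySem.List.pyRange 0 prt.length 1).map (fun i => -i - 1))) n)
      = pvOuterLoop prt K (prt.headD []).length n
          (PySem.List.combinations (List.range prt.length) n) := by
  set D := prt.length with hD
  set W := (prt.headD []).length with hW
  have haL : (PySem.List.pyRange 0 (D : Int) 1).map (fun i => i + 1)
      = (List.range D).map (fun k : Nat => (k : Int) + 1) := by
    rw [pvPyRange_eq]; simp [List.map_map, Function.comp_def]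
  have hbL : (PySem.List.pyRange 0 (D : Int) 1).map (fun i => -i - 1)
      = (List.range D).map (fun k : Nat => -(k : Int) - 1) := by
    rw [pvPyRange_eq]; simp [List.map_map, Function.comp_def]
  have hAB : ∀ t ∈ ((PySem.List.pyRange 0 (D : Int) 1).map (fun i => i + 1)) ++
      ((PySem.List.pyRange 0 (D : Int) 1).map (fun i => -i - 1)),
      0 ≤ pvIdxI t ∧ pvIdxI t < (D : Int) := by
    rw [haL, hbL]
    intro t ht
    rcases List.mem_append.mp ht with h | h <;>
      obtain ⟨k, hk, rfl⟩ := List.mem_map.mp h <;>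
      rw [List.mem_range] at hk <;> unfold pvIdxI
    · rw [if_pos (by omega)]; omega
    · rw [if_neg (by omega)]; omega
  have hiff : ∀ s : List (Nat × Char),
      (pvProtectionCnt (pvApplyS prt W s) K = (W : Int)) ↔
        pvAllCols (pvApplyS prt W s) K W = true :=
    fun s => pvCnt_eq_iff _ _ _ (pvApplyS_headLen prt W s rfl)
  have e0 : ∀ rc : Nat × Char, pvIdxI ((rc.1 : Int) + 1) = (rc.1 : Int) := by
    intro rc; unfold pvIdxI; rw [if_pos (by omega)]; ring
  have e1 : ∀ rc : Nat × Char, pvIdxI (-(rc.1 : Int) - 1) = (rc.1 : Int) := by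
    intro rc; unfold pvIdxI; rw [if_neg (by omega)]; ring
  refine Bool.eq_iff_iff.mpr ?_
  rw [pvStepLoop_iff, pvOuterLoop_iff]
  constructor
  · rintro ⟨tup, htmem, hnd, hcnt⟩
    rw [PySem.List.mem_combinations_iff] at htmem
    obtain ⟨hsub, hlen⟩ := htmem
    have htAB : ∀ t ∈ tup, 0 ≤ pvIdxI t ∧ pvIdxI t < (D : Int) :=
      fun t ht => hAB t (hsub.subset ht)
    have hfst : (tup.map pvToRC).map Prod.fst = (tup.map pvIdxI).map Int.toNat := by
      simp [List.map_map, pvToRC, Function.comp_def]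
    have hndfst : ((tup.map pvToRC).map Prod.fst).Nodup := by
      rw [hfst]
      refine hnd.map_on ?_
      intro x hx y hy hxy
      obtain ⟨tx, htx, rfl⟩ := List.mem_map.mp hx
      obtain ⟨ty, hty, rfl⟩ := List.mem_map.mp hy
      have h1 := (htAB tx htx).1
      have h2 := (htAB ty hty).1
      omega
    set s' := (tup.map pvToRC).mergeSort (fun a b => decide (a.1 ≤ b.1)) with hs'
    have hperm : s'.Perm (tup.map pvToRC) := List.mergeSort_perm _ _
    have hpair : List.Pairwise (fun a b : Nat × Char => decide (a.1 ≤ b.1) = true) s' :=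
      List.pairwise_mergeSort (by intro a b c h1 h2; simp at h1 h2 ⊢; omega)
        (by intro a b; simp; omega) _
    have hnd' : (s'.map Prod.fst).Nodup := (hperm.map Prod.fst).nodup_iff.mpr hndfst
    have hne : List.Pairwise (fun a b : Nat × Char => a.1 ≠ b.1) s' :=
      List.pairwise_map.mp hnd'
    have hlt : List.Pairwise (fun a b : Nat × Char => a.1 < b.1) s' := by
      refine (hpair.and hne).imp ?_
      rintro a b ⟨h1, h2⟩
      simp at h1; omega
    have hrowsPair : List.Pairwise (· < ·) (s'.map Prod.fst) :=
      List.pairwise_map.mpr hlt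
    have hrowsBound : ∀ x ∈ s'.map Prod.fst, x < D := by
      intro x hx
      have hx' : x ∈ (tup.map pvToRC).map Prod.fst := (hperm.map Prod.fst).subset hx
      rw [hfst] at hx'
      obtain ⟨y, hy, rfl⟩ := List.mem_map.mp hx'
      obtain ⟨t, ht, rfl⟩ := List.mem_map.mp hy
      have := htAB t ht
      omega
    have hrowsMem : s'.map Prod.fst ∈ PySem.List.combinations (List.range D) n := by
      rw [PySem.List.mem_combinations_iff]
      refine ⟨pvSublistRange _ _ hrowsPair hrowsBound, ?_⟩
      simp [hperm.length_eq, hlen]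
    have hsignsMem : s'.map Prod.snd ∈ pvSignLists n := by
      rw [pvSignLists_mem]
      refine ⟨by simp [hperm.length_eq, hlen], ?_⟩
      intro c hc
      have hc' : c ∈ (tup.map pvToRC).map Prod.snd := (hperm.map Prod.snd).subset hc
      obtain ⟨rc, hrc, rfl⟩ := List.mem_map.mp hc'
      obtain ⟨t, ht, rfl⟩ := List.mem_map.mp hrc
      unfold pvToRC
      split
      · exact Or.inl rfl
      · exact Or.inr rfl
    refine ⟨s'.map Prod.fst, hrowsMem, (pvInnerLoop_iff _ _ _ _ _).mpr
      ⟨s'.map Prod.snd, hsignsMem, ?_⟩⟩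
    rw [← List.zip_of_prod (xs := s') rfl rfl]
    rw [pvApplyS_perm prt W hperm hnd']
    exact (hiff _).mp hcnt
  · rintro ⟨rows, hrmem, hinner⟩
    rw [PySem.List.mem_combinations_iff] at hrmem
    obtain ⟨hrsub, hrlen⟩ := hrmem
    obtain ⟨signs, hsmem, hpass⟩ := (pvInnerLoop_iff _ _ _ _ _).mp hinner
    obtain ⟨hslen, hschars⟩ := pvSignLists_mem.mp hsmem
    have hlens : rows.length = signs.length := by rw [hrlen, hslen]
    have hfst : (rows.zip signs).map Prod.fst = rows := List.map_fst_zip (le_of_eq hlens)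
    have hsnd : (rows.zip signs).map Prod.snd = signs :=
      List.map_snd_zip (le_of_eq hlens.symm)
    have hrnd : rows.Nodup := hrsub.nodup List.nodup_range
    have h01 : ∀ rc ∈ rows.zip signs, rc.2 = '0' ∨ rc.2 = '1' := by
      intro rc hrc
      exact hschars _ (hsnd ▸ List.mem_map_of_mem hrc)
    set p : Nat × Char → Bool := fun rc => rc.2 == '0' with hp
    set s0 := (rows.zip signs).filter p with hs0
    set s1 := (rows.zip signs).filter (fun rc => !p rc) with hs1
    set tup := s0.map (fun rc => (rc.1 : Int) + 1) ++ s1.map (fun rc => -(rc.1 : Int) - 1)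
      with htup
    have hpermS : (s0 ++ s1).Perm (rows.zip signs) := List.filter_append_perm p _
    have hndApp : ((s0 ++ s1).map Prod.fst).Nodup :=
      (hpermS.map Prod.fst).nodup_iff.mpr (by rw [hfst]; exact hrnd)
    have htup_sub : tup.Sublist
        (((PySem.List.pyRange 0 (D : Int) 1).map (fun i => i + 1)) ++
          ((PySem.List.pyRange 0 (D : Int) 1).map (fun i => -i - 1))) := by
      rw [haL, hbL, htup]
      refine List.Sublist.append ?_ ?_
      · have h1 : s0.map (fun rc => (rc.1 : Int) + 1)
            = (s0.map Prod.fst).map (fun k : Nat => (k : Int) + 1) := by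
          simp [List.map_map, Function.comp_def]
        rw [h1]
        refine List.Sublist.map _ ?_
        have h2 : (s0.map Prod.fst).Sublist ((rows.zip signs).map Prod.fst) :=
          List.Sublist.map _ List.filter_sublist
        rw [hfst] at h2
        exact h2.trans hrsub
      · have h1 : s1.map (fun rc => -(rc.1 : Int) - 1)
            = (s1.map Prod.fst).map (fun k : Nat => -(k : Int) - 1) := by
          simp [List.map_map, Function.comp_def]
        rw [h1]
        refine List.Sublist.map _ ?_
        have h2 : (s1.map Prod.fst).Sublist ((rows.zip signs).map Prod.fst) :=
          List.Sublist.map _ List.filter_sublist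
        rw [hfst] at h2
        exact h2.trans hrsub
    have htup_len : tup.length = n := by
      rw [htup]
      have h2 := hpermS.length_eq
      simp only [List.length_append, List.length_map] at h2 ⊢
      rw [h2, List.length_zip]
      omega
    have hmapIdx : tup.map pvIdxI = ((s0 ++ s1).map Prod.fst).map (fun k : Nat => (k : Int)) := by
      rw [htup]
      simp only [List.map_append, List.map_map]
      congr 1
      · exact List.map_congr_left (fun rc _ => e0 rc)
      · exact List.map_congr_left (fun rc _ => e1 rc)
    have hndIdx : (tup.map pvIdxI).Nodup := by
      rw [hmapIdx]
      exact hndApp.map (fun a b h => by exact_mod_cast h)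
    have hmapRC : tup.map pvToRC = s0 ++ s1 := by
      rw [htup]
      simp only [List.map_append, List.map_map]
      congr 1
      · refine (List.map_congr_left ?_).trans (List.map_id _)
        intro rc hrc
        have h0 : rc.2 = '0' := by
          have := (List.mem_filter.mp (hs0 ▸ hrc)).2
          simpa [hp] using this
        show pvToRC ((rc.1 : Int) + 1) = rc
        unfold pvToRC
        rw [if_pos (by omega), e0]
        exact Prod.ext (by simp) (by simp [h0])
      · refine (List.map_congr_left ?_).trans (List.map_id _)
        intro rc hrc
        have hmem : rc ∈ (rows.zip signs) := List.filter_sublist.subset (hs1 ▸ hrc)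
        have hne0 : ¬ rc.2 = '0' := by
          have := (List.mem_filter.mp (hs1 ▸ hrc)).2
          simpa [hp] using this
        have h1 : rc.2 = '1' := (h01 rc hmem).resolve_left hne0
        show pvToRC (-(rc.1 : Int) - 1) = rc
        unfold pvToRC
        rw [if_neg (by omega), e1]
        exact Prod.ext (by simp) (by simp [h1])
    refine ⟨tup, ?_, hndIdx, ?_⟩
    · rw [PySem.List.mem_combinations_iff]
      exact ⟨htup_sub, htup_len⟩
    · refine (hiff _).mpr ?_
      rw [hmapRC, pvApplyS_perm prt W hpermS hndApp]
      exact hpass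

-- ===== VERDICT (by name: the statement is the Claim_ definition above) =====
theorem step_py_spec : Claim_equal_step_py := by
  intro prt_list K n_step _ _
  show step_py prt_list K n_step = step_py_alt prt_list K n_step
  exact pvMain (prt_list.map String.toList) K n_step.toNat
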